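-- pv_equiv track=rewrite | github.com/ArekBlej/Python-projects-for-beginners | Zadanie domowe 2 (algorytmy i struktury danych).py | czy_v
-- ===== SOURCE A (Python) =====
-- def czy_v(A):
--     rosnace = True
--     for i in range(1, len(A)):
--         if A[i - 1] > A[i]:
--             rosnace = False
--         if A[i - 1] < A[i] and not rosnace:
--             return False
--     return A[0] <= A[1] and not rosnace
-- ===== SOURCE B (Python) =====
-- def czy_v(A):
--     p = next((i for i in range(1, len(A)) if A[i - 1] > A[i]), None)
--     return A[0] <= A[1] and p is not None and all(
--         A[j - 1] >= A[j] for j in range(p + 1, len(A)))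
-- ===== Notes on version B (the rewrite author's own statement) =====
-- stated objective: simpler
-- what changed: Replaced A's single stateful loop (mutable 'rosnace' flag with an early return) by two independent scans: find the index of the first strict drop, then check that the suffix after it is non-increasing.
import Mathlib
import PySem

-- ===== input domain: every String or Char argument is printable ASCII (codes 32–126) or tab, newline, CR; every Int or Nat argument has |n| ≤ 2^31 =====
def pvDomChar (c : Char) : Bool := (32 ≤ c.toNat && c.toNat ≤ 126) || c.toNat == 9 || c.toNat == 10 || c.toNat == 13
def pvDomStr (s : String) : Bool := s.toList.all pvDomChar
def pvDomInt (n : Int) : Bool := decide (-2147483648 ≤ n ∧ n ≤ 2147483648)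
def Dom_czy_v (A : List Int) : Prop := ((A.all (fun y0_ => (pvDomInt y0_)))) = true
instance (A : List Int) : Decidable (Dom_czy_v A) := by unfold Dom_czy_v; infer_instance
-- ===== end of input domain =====

-- B replaces A's single stateful early-return loop by two independent scans (find the
-- first strict drop, then check the suffix after it is non-increasing); objective: simpler.

-- ===== PORT A =====
-- A's for-loop with the mutable flag `rosnace` and the early `return False`:
-- structural recursion on the index i; reaching the end yields the final return expression.
def czyGo (A : List Int) (i : Nat) (rosnace : Bool) : Bool :=
  if _h : i < A.length then
    let r := if A.getD (i - 1) 0 > A.getD i 0 then false else rosnace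
    if decide (A.getD (i - 1) 0 < A.getD i 0) && !r then false
    else czyGo A (i + 1) r
  else decide (A.getD 0 0 ≤ A.getD 1 0) && !rosnace
termination_by A.length - i

def czy_v (A : List Int) : Bool := czyGo A 1 true

-- ===== PORT B =====
def czy_v_alt (A : List Int) : Bool :=
  let p := (List.range' 1 (A.length - 1)).find?
    (fun i => decide (A.getD (i - 1) 0 > A.getD i 0))
  decide (A.getD 0 0 ≤ A.getD 1 0) &&
    match p with
    | none => false
    | some q => (List.range' (q + 1) (A.length - (q + 1))).all
        (fun j => decide (A.getD (j - 1) 0 ≥ A.getD j 0))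

-- ===== PRECONDITION & SPEC =====
-- Pre_ excludes lists of fewer than two elements, on which the Python A (and B) raises IndexError.
def Pre_czy_v (A : List Int) : Prop := 2 ≤ A.length
instance (A : List Int) : Decidable (Pre_czy_v A) := by unfold Pre_czy_v; infer_instance
def pvWitness_czy_v : List Int := [1, 3, 2, 0]

def Spec_czy_v (A : List Int) (out : Bool) : Prop := out = czy_v_alt A
instance (A : List Int) (out : Bool) : Decidable (Spec_czy_v A out) := by unfold Spec_czy_v; infer_instance

-- ===== CLAIM (what is proved, stated in full; the proofs are below) =====
def Claim_equal_czy_v : Prop := ∀ (A : List Int), Dom_czy_v A → Pre_czy_v A → Spec_czy_v A (czy_v A)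

-- ===== LEMMAS AND PROOFS =====

-- Once the flag is false, the loop returns A[0] ≤ A[1] conjoined with the suffix being non-increasing.
lemma czyGo_false (A : List Int) : ∀ (n i : Nat), A.length - i = n →
    czyGo A i false =
      (decide (A.getD 0 0 ≤ A.getD 1 0) &&
        (List.range' i n).all (fun j => decide (A.getD (j - 1) 0 ≥ A.getD j 0)))
  | 0, i, h => by
    have hi : ¬ i < A.length := by omega
    rw [czyGo]
    simp [hi]
  | n + 1, i, h => by
    have hi : i < A.length := by omega
    rw [czyGo]
    rw [dif_pos hi]
    by_cases hlt : A.getD (i - 1) 0 < A.getD i 0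
    · have hge : ¬ A.getD (i - 1) 0 ≥ A.getD i 0 := by omega
      simp only [ite_self, hlt, decide_true, Bool.not_false, Bool.and_true, if_true,
        List.range'_succ, List.all_cons, hge, decide_false, Bool.false_and, Bool.and_false]
    · have hge : A.getD (i - 1) 0 ≥ A.getD i 0 := by omega
      have ih := czyGo_false A n (i + 1) (by omega)
      simp only [ite_self, hlt, decide_false, Bool.false_eq_true, Bool.not_false, Bool.and_true, Bool.false_and,
        if_false, ih, List.range'_succ, List.all_cons, hge, decide_true, Bool.true_and,
        Bool.and_assoc]

-- With the flag still true, the loop scans to the first strict drop and then behaves as czyGo_false.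
lemma czyGo_true (A : List Int) : ∀ (n i : Nat), A.length - i = n →
    czyGo A i true =
      ((List.range' i n).find? (fun j => decide (A.getD (j - 1) 0 > A.getD j 0))).elim
        false
        (fun q => decide (A.getD 0 0 ≤ A.getD 1 0) &&
          (List.range' (q + 1) (A.length - (q + 1))).all
            (fun j => decide (A.getD (j - 1) 0 ≥ A.getD j 0)))
  | 0, i, h => by
    have hi : ¬ i < A.length := by omega
    rw [czyGo]
    simp [hi]
  | n + 1, i, h => by
    have hi : i < A.length := by omega
    rw [czyGo]
    rw [dif_pos hi]
    by_cases hgt : A.getD (i - 1) 0 > A.getD i 0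
    · have hlt : ¬ A.getD (i - 1) 0 < A.getD i 0 := by omega
      have hf := czyGo_false A (A.length - (i + 1)) (i + 1) rfl
      simp only [gt_iff_lt, hgt, if_true, hlt, decide_true, decide_false, Bool.false_eq_true, Bool.not_false,
        Bool.false_and, if_false, hf, List.range'_succ, List.find?_cons, Option.elim_some]
    · have ih := czyGo_true A n (i + 1) (by omega)
      simp only [gt_iff_lt, hgt, if_false, hgt, decide_false, Bool.false_eq_true, Bool.not_true, Bool.and_false,
        ih, List.range'_succ, List.find?_cons]

-- ===== VERDICT (by name: the statement is the Claim_ definition above) =====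
theorem czy_v_spec : Claim_equal_czy_v := by
  intro A _ _
  unfold Spec_czy_v czy_v czy_v_alt
  rw [czyGo_true A (A.length - 1) 1 rfl]
  cases hp : (List.range' 1 (A.length - 1)).find?
      (fun j => decide (A.getD (j - 1) 0 > A.getD j 0)) with
  | none => simp [Option.elim]
  | some q => simp [Option.elim]
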